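-- pv_equiv track=rewrite | github.com/OhadRubin/hastar | test_proper_diagonal.py | create_triangular_cone
-- ===== SOURCE A (Python) =====
-- def create_triangular_cone(robotX, robotY, dirX, dirY, sensorRange):
--     """Create a proper triangular cone pattern like the ASCII examples"""
--     grid = [['.' for _ in range(21)] for _ in range(21)]
--     grid[robotY][robotX] = 'R'
--
--     for dist in range(1, sensorRange + 1):
--         # Calculate the forward position
--         frontX = robotX + dirX * dist
--         frontY = robotY + dirY * dist
--
--         # Create triangular spread - width increases with distance
--         width = dist  # Triangle gets wider as it goes forward
--
--         for w in range(-width, width + 1):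
--             # For diagonals, we need to spread perpendicular to the direction
--             # Calculate perpendicular spread
--             if dirX == 1 and dirY == -1:  # NORTHEAST
--                 x = frontX + w
--                 y = frontY + w
--             elif dirX == 1 and dirY == 1:  # SOUTHEAST
--                 x = frontX - w
--                 y = frontY + w
--             elif dirX == -1 and dirY == 1:  # SOUTHWEST
--                 x = frontX - w
--                 y = frontY - w
--             elif dirX == -1 and dirY == -1:  # NORTHWEST
--                 x = frontX + w
--                 y = frontY - w
--             else:
--                 continue
--
--             if 0 <= x < 21 and 0 <= y < 21:
--                 if grid[y][x] == '.':
--                     grid[y][x] = '#'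
--
--     return grid
-- ===== SOURCE B (Python) =====
-- def create_triangular_cone(robotX, robotY, dirX, dirY, sensorRange):
--     """Create a proper triangular cone pattern like the ASCII examples"""
--     diagonal = dirX in (1, -1) and dirY in (1, -1)
--
--     def cell(x, y):
--         dx, dy = x - robotX, y - robotY
--         s = dirX * dx + dirY * dy          # 2*dist along the diagonal direction
--         t = dirX * dy - dirY * dx          # 2*w along the perpendicular
--         if diagonal and s % 2 == 0 and 2 <= s <= 2 * sensorRange and -s <= t <= s:
--             return '#'
--         return '.'
--
--     grid = [[cell(x, y) for x in range(21)] for y in range(21)]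
--     grid[robotY][robotX] = 'R'
--     return grid
-- ===== Notes on version B (the rewrite author's own statement) =====
-- stated objective: faster
-- what changed: B replaces A's O(sensorRange^2) generate-and-mark double loop over (dist, w) by a single pass over the fixed 21x21 grid that tests each cell directly, inverting the offset equations (s = dirX*dx + dirY*dy = 2*dist, t = dirX*dy - dirY*dx = 2*w) and placing 'R' last.
import Mathlib
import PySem

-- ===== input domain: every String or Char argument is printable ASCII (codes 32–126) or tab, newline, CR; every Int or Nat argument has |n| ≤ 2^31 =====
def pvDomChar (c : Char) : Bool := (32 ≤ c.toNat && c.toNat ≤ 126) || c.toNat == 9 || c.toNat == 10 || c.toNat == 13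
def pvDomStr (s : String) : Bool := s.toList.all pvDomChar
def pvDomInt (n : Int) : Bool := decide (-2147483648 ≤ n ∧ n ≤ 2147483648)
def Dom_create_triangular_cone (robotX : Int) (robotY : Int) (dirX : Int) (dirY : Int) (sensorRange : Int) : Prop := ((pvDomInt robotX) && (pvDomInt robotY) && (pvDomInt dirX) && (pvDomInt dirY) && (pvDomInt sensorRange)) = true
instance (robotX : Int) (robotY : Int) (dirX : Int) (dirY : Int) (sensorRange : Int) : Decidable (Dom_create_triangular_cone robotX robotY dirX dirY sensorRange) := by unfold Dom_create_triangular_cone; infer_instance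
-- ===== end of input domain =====

-- B replaces A's O(sensorRange^2) cell-generating double loop by a direct O(1)-per-cell
-- membership test over the fixed 21x21 grid (inverting the (dist,w) parametrisation).

-- Python list indexing for a length-21 list (valid for indices in [-21,20], which Pre_ ensures
-- for the robot coordinates; all other indexing in both programs is guarded to [0,21)).
def pvIdx (i : Int) : Nat := (if i < 0 then i + 21 else i).toNat

def getN (g : List (List String)) (i j : Nat) : String := (g.getD j []).getD i ""

def setN (g : List (List String)) (i j : Nat) (v : String) : List (List String) :=
  g.set j ((g.getD j []).set i v)

def pvGet (g : List (List String)) (x y : Int) : String := getN g (pvIdx x) (pvIdx y)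

def pvSet (g : List (List String)) (x y : Int) (v : String) : List (List String) :=
  setN g (pvIdx x) (pvIdx y) v

-- ===== PORT A =====
-- grid[y][x] = '#' if in bounds and still '.'
def aMark (g : List (List String)) (x y : Int) : List (List String) :=
  if 0 ≤ x ∧ x < 21 ∧ 0 ≤ y ∧ y < 21 then
    (if pvGet g x y = "." then pvSet g x y "#" else g)
  else g

-- body of A's inner 'for w' loop (the four diagonal branches, else continue)
def aInner (dirX dirY frontX frontY : Int) (g : List (List String)) (w : Int) :
    List (List String) :=
  if dirX = 1 ∧ dirY = -1 then aMark g (frontX + w) (frontY + w)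
  else if dirX = 1 ∧ dirY = 1 then aMark g (frontX - w) (frontY + w)
  else if dirX = -1 ∧ dirY = 1 then aMark g (frontX - w) (frontY - w)
  else if dirX = -1 ∧ dirY = -1 then aMark g (frontX + w) (frontY - w)
  else g

def create_triangular_cone (robotX : Int) (robotY : Int) (dirX : Int) (dirY : Int) (sensorRange : Int) : List (List String) :=
  let grid0 := List.replicate 21 (List.replicate 21 ".")
  let grid1 := pvSet grid0 robotX robotY "R"
  (PySem.List.pyRange 1 (sensorRange + 1) 1).foldl (fun g dist =>
    let frontX := robotX + dirX * dist
    let frontY := robotY + dirY * dist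
    (PySem.List.pyRange (-dist) (dist + 1) 1).foldl (aInner dirX dirY frontX frontY) g) grid1

-- ===== PORT B =====
-- B's per-cell test: solve the offset equations; s = 2*dist, t = 2*w.
def bCell (robotX robotY dirX dirY sensorRange x y : Int) : String :=
  let dx := x - robotX
  let dy := y - robotY
  let s := dirX * dx + dirY * dy
  let t := dirX * dy - dirY * dx
  if ((dirX = 1 ∨ dirX = -1) ∧ (dirY = 1 ∨ dirY = -1)) ∧ s % 2 = 0 ∧ 2 ≤ s ∧ s ≤ 2 * sensorRange ∧ -s ≤ t ∧ t ≤ s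
  then "#" else "."

def create_triangular_cone_alt (robotX : Int) (robotY : Int) (dirX : Int) (dirY : Int) (sensorRange : Int) : List (List String) :=
  let base := (List.range 21).map (fun (y : Nat) => (List.range 21).map (fun (x : Nat) =>
    bCell robotX robotY dirX dirY sensorRange (Int.ofNat x) (Int.ofNat y)))
  pvSet base robotX robotY "R"

-- ===== PRECONDITION & SPEC =====
-- Pre_ excludes exactly the inputs where A raises IndexError: robot coordinates outside the
-- valid Python index range [-21, 20] of the 21-wide grid.
def Pre_create_triangular_cone (robotX : Int) (robotY : Int) (dirX : Int) (dirY : Int) (sensorRange : Int) : Prop :=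
  -21 ≤ robotX ∧ robotX ≤ 20 ∧ -21 ≤ robotY ∧ robotY ≤ 20

instance (robotX : Int) (robotY : Int) (dirX : Int) (dirY : Int) (sensorRange : Int) : Decidable (Pre_create_triangular_cone robotX robotY dirX dirY sensorRange) := by
  unfold Pre_create_triangular_cone; infer_instance

def pvWitness_create_triangular_cone : Int × Int × Int × Int × Int := (3, 4, 1, 1, 2)

def Spec_create_triangular_cone (robotX : Int) (robotY : Int) (dirX : Int) (dirY : Int) (sensorRange : Int) (out : List (List String)) : Prop := out = create_triangular_cone_alt robotX robotY dirX dirY sensorRange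
instance (robotX : Int) (robotY : Int) (dirX : Int) (dirY : Int) (sensorRange : Int) (out : List (List String)) : Decidable (Spec_create_triangular_cone robotX robotY dirX dirY sensorRange out) := by unfold Spec_create_triangular_cone; infer_instance

-- ===== CLAIM (what is proved, stated in full; the proofs are below) =====
def Claim_equal_create_triangular_cone : Prop := ∀ (robotX : Int) (robotY : Int) (dirX : Int) (dirY : Int) (sensorRange : Int), Dom_create_triangular_cone robotX robotY dirX dirY sensorRange → Pre_create_triangular_cone robotX robotY dirX dirY sensorRange → Spec_create_triangular_cone robotX robotY dirX dirY sensorRange (create_triangular_cone robotX robotY dirX dirY sensorRange)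

-- ===== LEMMAS AND PROOFS =====

def Shape (g : List (List String)) : Prop := g.length = 21 ∧ ∀ r ∈ g, r.length = 21

theorem shape_setN (g : List (List String)) (i j : Nat) (v : String) (h : Shape g) :
    Shape (setN g i j v) := by
  obtain ⟨h1, h2⟩ := h
  refine ⟨by simp [setN, h1], ?_⟩
  by_cases hj : j < g.length
  · intro r hr
    rcases List.mem_or_eq_of_mem_set hr with hmem | rfl
    · exact h2 r hmem
    · have hmem : g.getD j [] ∈ g := by
        rw [List.getD_eq_getElem _ _ hj]; exact List.getElem_mem _
      rw [List.length_set]; exact h2 _ hmem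
  · unfold setN
    rw [List.set_eq_of_length_le (by omega)]
    exact h2

theorem getN_setN_self (g : List (List String)) (i j : Nat) (v : String)
    (h : Shape g) (hi : i < 21) (hj : j < 21) : getN (setN g i j v) i j = v := by
  obtain ⟨h1, h2⟩ := h
  have hj' : j < g.length := by omega
  have hrl : (g.getD j []).length = 21 := h2 _ (by
    rw [List.getD_eq_getElem _ _ hj']; exact List.getElem_mem _)
  rw [List.getD_eq_getElem?_getD] at hrl
  simp only [getN, setN, List.getD_eq_getElem?_getD]
  rw [List.getElem?_set_self hj']
  simp only [Option.getD_some]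
  rw [List.getElem?_set_self (by omega)]
  rfl

theorem getN_setN_ne (g : List (List String)) (i j i' j' : Nat) (v : String)
    (h : Shape g) (hne : ¬(i' = i ∧ j' = j)) :
    getN (setN g i j v) i' j' = getN g i' j' := by
  obtain ⟨h1, h2⟩ := h
  simp only [getN, setN, List.getD_eq_getElem?_getD]
  by_cases hjj : j' = j
  · subst hjj
    have hi' : i ≠ i' := fun hc => hne ⟨hc.symm, rfl⟩
    by_cases hj' : j' < g.length
    · rw [List.getElem?_set_self hj']
      simp only [Option.getD_some]
      rw [List.getElem?_set_ne hi']
    · rw [List.set_eq_of_length_le (by omega)]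
  · rw [List.getElem?_set_ne (Ne.symm hjj)]

theorem pvIdx_natCast (i : Nat) : pvIdx (i : Int) = i := by
  rw [pvIdx, if_neg (by omega : ¬((i : Int) < 0))]
  omega

theorem shape_aMark (g : List (List String)) (x y : Int) (h : Shape g) :
    Shape (aMark g x y) := by
  unfold aMark
  split_ifs with h1 h2
  · exact shape_setN _ _ _ _ h
  · exact h
  · exact h

theorem shape_foldMark (ps : List (Int × Int)) (g : List (List String)) (h : Shape g) :
    Shape (ps.foldl (fun g p => aMark g p.1 p.2) g) := by
  induction ps generalizing g with
  | nil => exact h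
  | cons p t ih => exact ih _ (shape_aMark _ _ _ h)

-- cell (i,j) after aMark at in-bounds or out-of-bounds position
theorem getN_aMark_other (g : List (List String)) (x y : Int) (i j : Nat)
    (h : Shape g) (hne : ¬((i : Int) = x ∧ (j : Int) = y)) :
    getN (aMark g x y) i j = getN g i j := by
  unfold aMark
  split_ifs with h1 h2
  · obtain ⟨hx0, hx1, hy0, hy1⟩ := h1
    have hx : pvIdx x = x.toNat := by simp [pvIdx, not_lt.mpr hx0]
    have hy : pvIdx y = y.toNat := by simp [pvIdx, not_lt.mpr hy0]
    rw [pvSet, hx, hy]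
    exact getN_setN_ne _ _ _ _ _ _ h (by omega)
  · rfl
  · rfl

theorem getN_aMark_self (g : List (List String)) (i j : Nat)
    (h : Shape g) (hi : i < 21) (hj : j < 21) :
    getN (aMark g (i : Int) (j : Int)) i j = if getN g i j = "." then "#" else getN g i j := by
  unfold aMark
  rw [if_pos (by omega)]
  have hget : pvGet g (i : Int) (j : Int) = getN g i j := by
    rw [pvGet, pvIdx_natCast, pvIdx_natCast]
  rw [hget]
  split_ifs with hc
  · rw [pvSet, pvIdx_natCast, pvIdx_natCast]
    exact getN_setN_self _ _ _ _ h hi hj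
  · rfl

-- the fold of marks: a cell becomes '#' iff it is '.' and listed
theorem foldMark_getN (ps : List (Int × Int)) (g : List (List String)) (i j : Nat)
    (h : Shape g) (hi : i < 21) (hj : j < 21) :
    getN (ps.foldl (fun g p => aMark g p.1 p.2) g) i j =
      if ((i : Int), (j : Int)) ∈ ps ∧ getN g i j = "." then "#" else getN g i j := by
  induction ps generalizing g with
  | nil => simp
  | cons p t ih =>
    rw [List.foldl_cons, ih _ (shape_aMark _ _ _ h)]
    by_cases hp : ((i : Int), (j : Int)) = p
    · subst hp
      rw [getN_aMark_self _ _ _ h hi hj]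
      by_cases hc : getN g i j = "."
      · simp only [hc, if_pos rfl]
        by_cases hm : ((i : Int), (j : Int)) ∈ t <;> simp [hm, hc]
      · simp [hc]
    · have : getN (aMark g p.1 p.2) i j = getN g i j :=
        getN_aMark_other _ _ _ _ _ h (fun hcontra => hp (Prod.ext_iff.mpr hcontra))
      rw [this]
      by_cases hm : ((i : Int), (j : Int)) ∈ t
      · simp [hm, List.mem_cons]
      · have : ¬((i : Int), (j : Int)) ∈ p :: t := by
          simp only [List.mem_cons, hm, or_false]
          exact hp
        simp [hm, this]

-- initial grid
theorem shape_grid0 : Shape (List.replicate 21 (List.replicate 21 ".")) := by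
  constructor
  · simp
  · intro r hr
    rw [List.eq_of_mem_replicate hr]; simp

theorem getN_grid0 (i j : Nat) (hi : i < 21) (hj : j < 21) :
    getN (List.replicate 21 (List.replicate 21 ".")) i j = "." := by
  have h1 : (List.replicate 21 (List.replicate 21 ".")).getD j [] = List.replicate 21 "." := by
    rw [List.getD_eq_getElem _ _ (by rw [List.length_replicate]; exact hj)]
    rw [List.getElem_replicate]
  rw [getN, h1, List.getD_eq_getElem _ _ (by rw [List.length_replicate]; exact hi)]
  rw [List.getElem_replicate]

-- fold over flatMap
theorem foldl_flat {α β γ : Type} (f : α → γ → α) (h : β → List γ) (L : List β) (g : α) :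
    L.foldl (fun a b => (h b).foldl f a) g = (L.flatMap h).foldl f g := by
  induction L generalizing g with
  | nil => rfl
  | cons b t ih => rw [List.foldl_cons, List.flatMap_cons, List.foldl_append, ih]

-- B's base grid, cellwise
theorem getN_base (robotX robotY dirX dirY sensorRange : Int) (i j : Nat) (hi : i < 21) (hj : j < 21) :
    getN ((List.range 21).map (fun (y : Nat) => (List.range 21).map (fun (x : Nat) =>
      bCell robotX robotY dirX dirY sensorRange (Int.ofNat x) (Int.ofNat y)))) i j =
      bCell robotX robotY dirX dirY sensorRange (i : Int) (j : Int) := by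
  have hrow : (((List.range 21).map (fun (y : Nat) => (List.range 21).map (fun (x : Nat) =>
      bCell robotX robotY dirX dirY sensorRange (Int.ofNat x) (Int.ofNat y)))).getD j [])
      = (List.range 21).map (fun (x : Nat) =>
        bCell robotX robotY dirX dirY sensorRange (Int.ofNat x) (Int.ofNat j)) := by
    rw [List.getD_eq_getElem _ _ (by rw [List.length_map, List.length_range]; exact hj)]
    rw [List.getElem_map, List.getElem_range]
  rw [getN, hrow]
  rw [List.getD_eq_getElem _ _ (by rw [List.length_map, List.length_range]; exact hi)]
  rw [List.getElem_map, List.getElem_range]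
  rfl

theorem shape_base (robotX robotY dirX dirY sensorRange : Int) :
    Shape ((List.range 21).map (fun (y : Nat) => (List.range 21).map (fun (x : Nat) =>
      bCell robotX robotY dirX dirY sensorRange (Int.ofNat x) (Int.ofNat y)))) := by
  constructor
  · simp
  · intro r hr
    obtain ⟨a, _, rfl⟩ := List.mem_map.mp hr
    simp

-- grids equal from cellwise equality
theorem grid_ext (g g' : List (List String)) (hg : Shape g) (hg' : Shape g')
    (h : ∀ i j : Nat, i < 21 → j < 21 → getN g i j = getN g' i j) : g = g' := by
  obtain ⟨hl, hr⟩ := hg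
  obtain ⟨hl', hr'⟩ := hg'
  apply List.ext_getElem (by omega)
  intro j hj1 hj2
  have hrow1 : g[j] ∈ g := List.getElem_mem _
  have hrow2 : g'[j] ∈ g' := List.getElem_mem _
  apply List.ext_getElem (by rw [hr _ hrow1, hr' _ hrow2])
  intro i hi1 hi2
  have hi21 : i < 21 := by rw [hr _ hrow1] at hi1; exact hi1
  have hj21 : j < 21 := by omega
  have e1 : g.getD j [] = g[j] := List.getD_eq_getElem _ _ (by omega)
  have e2 : g'.getD j [] = g'[j] := List.getD_eq_getElem _ _ (by omega)
  have := h i j hi21 hj21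
  rw [getN, getN, e1, e2, List.getD_eq_getElem _ _ hi1, List.getD_eq_getElem _ _ hi2] at this
  exact this

def posList (robotX robotY dirX dirY sensorRange : Int) : List (Int × Int) :=
  (PySem.List.pyRange 1 (sensorRange + 1) 1).flatMap (fun d =>
    (PySem.List.pyRange (-d) (d + 1) 1).map (fun w =>
      (robotX + dirX * d - dirY * w, robotY + dirY * d + dirX * w)))

theorem aInner_diag (dirX dirY : Int) (hx : dirX = 1 ∨ dirX = -1) (hy : dirY = 1 ∨ dirY = -1)
    (fX fY : Int) (g : List (List String)) (w : Int) :
    aInner dirX dirY fX fY g w = aMark g (fX - dirY * w) (fY + dirX * w) := by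
  rcases hx with rfl | rfl <;> rcases hy with rfl | rfl <;>
    simp [aInner] <;> ring_nf

theorem A_eq_fold (robotX robotY dirX dirY sensorRange : Int)
    (hx : dirX = 1 ∨ dirX = -1) (hy : dirY = 1 ∨ dirY = -1) :
    create_triangular_cone robotX robotY dirX dirY sensorRange =
      (posList robotX robotY dirX dirY sensorRange).foldl (fun g p => aMark g p.1 p.2)
        (setN (List.replicate 21 (List.replicate 21 ".")) (pvIdx robotX) (pvIdx robotY) "R") := by
  unfold create_triangular_cone posList pvSet
  rw [← foldl_flat]
  dsimp only []
  congr 1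
  funext g d
  rw [List.foldl_map]
  congr 1
  funext g' w
  rw [aInner_diag dirX dirY hx hy]

theorem mem_posList (robotX robotY dirX dirY sensorRange : Int)
    (hx : dirX = 1 ∨ dirX = -1) (hy : dirY = 1 ∨ dirY = -1) (i j : Int) :
    ((i, j) ∈ posList robotX robotY dirX dirY sensorRange) ↔
      ((dirX * (i - robotX) + dirY * (j - robotY)) % 2 = 0 ∧
       2 ≤ dirX * (i - robotX) + dirY * (j - robotY) ∧
       dirX * (i - robotX) + dirY * (j - robotY) ≤ 2 * sensorRange ∧
       -(dirX * (i - robotX) + dirY * (j - robotY)) ≤ dirX * (j - robotY) - dirY * (i - robotX) ∧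
       dirX * (j - robotY) - dirY * (i - robotX) ≤ dirX * (i - robotX) + dirY * (j - robotY)) := by
  unfold posList
  simp only [List.mem_flatMap, List.mem_map, PySem.List.mem_pyRange_one, Prod.mk.injEq]
  constructor
  · rintro ⟨d, ⟨hd1, hd2⟩, w, ⟨⟨hw1, hw2⟩, hi, hj⟩⟩
    rcases hx with rfl | rfl <;> rcases hy with rfl | rfl <;>
      refine ⟨by omega, by omega, by omega, by omega, by omega⟩
  · rintro ⟨h1, h2, h3, h4, h5⟩
    refine ⟨(dirX * (i - robotX) + dirY * (j - robotY)) / 2, ⟨?_, ?_⟩,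
      (dirX * (j - robotY) - dirY * (i - robotX)) / 2, ⟨⟨?_, ?_⟩, ?_, ?_⟩⟩ <;>
      rcases hx with rfl | rfl <;> rcases hy with rfl | rfl <;> omega

theorem getN_grid1 (robotX robotY : Int) (i j : Nat) (hi : i < 21) (hj : j < 21)
    (hrX : pvIdx robotX < 21) (hrY : pvIdx robotY < 21) :
    getN (setN (List.replicate 21 (List.replicate 21 ".")) (pvIdx robotX) (pvIdx robotY) "R") i j =
      if i = pvIdx robotX ∧ j = pvIdx robotY then "R" else "." := by
  by_cases hc : i = pvIdx robotX ∧ j = pvIdx robotY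
  · obtain ⟨h1, h2⟩ := hc
    subst h1; subst h2
    rw [if_pos ⟨rfl, rfl⟩]
    exact getN_setN_self _ _ _ _ shape_grid0 hi hj
  · rw [if_neg hc, getN_setN_ne _ _ _ _ _ _ shape_grid0 hc, getN_grid0 _ _ hi hj]

theorem getN_Balt (robotX robotY dirX dirY sensorRange : Int) (i j : Nat)
    (hi : i < 21) (hj : j < 21) (hrX : pvIdx robotX < 21) (hrY : pvIdx robotY < 21) :
    getN (create_triangular_cone_alt robotX robotY dirX dirY sensorRange) i j =
      if i = pvIdx robotX ∧ j = pvIdx robotY then "R"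
      else bCell robotX robotY dirX dirY sensorRange (i : Int) (j : Int) := by
  unfold create_triangular_cone_alt pvSet
  by_cases hc : i = pvIdx robotX ∧ j = pvIdx robotY
  · obtain ⟨h1, h2⟩ := hc
    subst h1; subst h2
    rw [if_pos ⟨rfl, rfl⟩]
    exact getN_setN_self _ _ _ _ (shape_base _ _ _ _ _) hi hj
  · rw [if_neg hc, getN_setN_ne _ _ _ _ _ _ (shape_base _ _ _ _ _) hc,
      getN_base _ _ _ _ _ _ _ hi hj]

theorem shape_Balt (robotX robotY dirX dirY sensorRange : Int) :
    Shape (create_triangular_cone_alt robotX robotY dirX dirY sensorRange) :=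
  shape_setN _ _ _ _ (shape_base _ _ _ _ _)

theorem aInner_nondiag (dirX dirY fX fY : Int) (g : List (List String)) (w : Int)
    (h : ¬((dirX = 1 ∨ dirX = -1) ∧ (dirY = 1 ∨ dirY = -1))) :
    aInner dirX dirY fX fY g w = g := by
  unfold aInner
  split_ifs with h1 h2 h3 h4 <;> first | rfl | (exact absurd ⟨by tauto, by tauto⟩ h)

theorem foldl_inner_nondiag (dirX dirY fX fY : Int)
    (h : ¬((dirX = 1 ∨ dirX = -1) ∧ (dirY = 1 ∨ dirY = -1))) :
    ∀ (L : List Int) (g : List (List String)), L.foldl (aInner dirX dirY fX fY) g = g := by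
  intro L
  induction L with
  | nil => intro g; rfl
  | cons w t ih => intro g; rw [List.foldl_cons, aInner_nondiag _ _ _ _ _ _ h, ih]

theorem foldl_const {α β : Type} : ∀ (L : List β) (g : α), L.foldl (fun a _ => a) g = g := by
  intro L
  induction L with
  | nil => intro g; rfl
  | cons b t ih => intro g; rw [List.foldl_cons, ih]

theorem A_eq_grid1_nondiag (robotX robotY dirX dirY sensorRange : Int)
    (h : ¬((dirX = 1 ∨ dirX = -1) ∧ (dirY = 1 ∨ dirY = -1))) :
    create_triangular_cone robotX robotY dirX dirY sensorRange =
      setN (List.replicate 21 (List.replicate 21 ".")) (pvIdx robotX) (pvIdx robotY) "R" := by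
  unfold create_triangular_cone pvSet
  have hb : (fun (g : List (List String)) (dist : Int) =>
      (PySem.List.pyRange (-dist) (dist + 1) 1).foldl
        (aInner dirX dirY (robotX + dirX * dist) (robotY + dirY * dist)) g) =
      (fun g _ => g) := by
    funext g dist
    exact foldl_inner_nondiag _ _ _ _ h _ g
  rw [hb, foldl_const]

-- ===== VERDICT (by name: the statement is the Claim_ definition above) =====
theorem create_triangular_cone_spec : Claim_equal_create_triangular_cone := by
  intro robotX robotY dirX dirY sensorRange hdom hpre
  obtain ⟨ha, hb, hc, hd⟩ := hpre
  unfold Spec_create_triangular_cone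
  have hrX : pvIdx robotX < 21 := by unfold pvIdx; split <;> omega
  have hrY : pvIdx robotY < 21 := by unfold pvIdx; split <;> omega
  by_cases hdiag : ((dirX = 1 ∨ dirX = -1) ∧ (dirY = 1 ∨ dirY = -1))
  · rw [A_eq_fold _ _ _ _ _ hdiag.1 hdiag.2]
    apply grid_ext _ _ (shape_foldMark _ _ (shape_setN _ _ _ _ shape_grid0))
      (shape_Balt _ _ _ _ _)
    intro i j hi hj
    rw [foldMark_getN _ _ _ _ (shape_setN _ _ _ _ shape_grid0) hi hj,
      getN_grid1 _ _ _ _ hi hj hrX hrY, getN_Balt _ _ _ _ _ _ _ hi hj hrX hrY]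
    by_cases hcell : i = pvIdx robotX ∧ j = pvIdx robotY
    · simp [hcell]
    · rw [if_neg hcell, if_neg hcell]
      simp only [mem_posList _ _ _ _ _ hdiag.1 hdiag.2]
      simp only [bCell]
      simp only [and_true]
      split_ifs with h1 h2 <;> first | rfl | (exfalso; tauto)
  · rw [A_eq_grid1_nondiag _ _ _ _ _ hdiag]
    apply grid_ext _ _ (shape_setN _ _ _ _ shape_grid0) (shape_Balt _ _ _ _ _)
    intro i j hi hj
    rw [getN_grid1 _ _ _ _ hi hj hrX hrY, getN_Balt _ _ _ _ _ _ _ hi hj hrX hrY]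
    by_cases hcell : i = pvIdx robotX ∧ j = pvIdx robotY
    · rw [if_pos hcell, if_pos hcell]
    · rw [if_neg hcell, if_neg hcell]
      simp only [bCell]
      rw [if_neg (fun hcon => hdiag hcon.1)]
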